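-- pv_equiv track=rewrite | github.com/alihacks/advent-of-code | Python/19/solution.py | parse
-- ===== SOURCE A (Python) =====
-- from typing import List
--
-- def parse(instr: str) -> List:
--     is_rule = True
--     rules = {}
--     inputs = []
--     for line in instr.splitlines():
--         if is_rule:
--             if not line:
--                 is_rule = False
--                 continue
--             name, rule = line.replace('"', '').split(": ")
--             rule_list = []
--             for rulepart in rule.split(" | "):
--                 rule_list.append(rulepart.strip().split(' '))
--             rules.update({name: rule_list})
--         else:
--             inputs.append(line)
--     return rules, inputs
-- ===== SOURCE B (Python) =====
-- def parse(instr):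
--     lines = instr.splitlines()
--     try:
--         idx = lines.index('')
--         rule_lines, inputs = lines[:idx], lines[idx + 1:]
--     except ValueError:
--         rule_lines, inputs = lines, []
--     rules = {}
--     for line in rule_lines:
--         name, rule = line.replace('"', '').split(': ')
--         rules[name] = [part.strip().split(' ') for part in rule.split(' | ')]
--     return rules, inputs
-- ===== Notes on version B (the rewrite author's own statement) =====
-- stated objective: simpler
-- what changed: B replaces A's stateful is_rule flag loop with an upfront split of the line list at the first blank line (try lines.index('')), then parses the rule section and copies the input section separately.
import Mathlib
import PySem

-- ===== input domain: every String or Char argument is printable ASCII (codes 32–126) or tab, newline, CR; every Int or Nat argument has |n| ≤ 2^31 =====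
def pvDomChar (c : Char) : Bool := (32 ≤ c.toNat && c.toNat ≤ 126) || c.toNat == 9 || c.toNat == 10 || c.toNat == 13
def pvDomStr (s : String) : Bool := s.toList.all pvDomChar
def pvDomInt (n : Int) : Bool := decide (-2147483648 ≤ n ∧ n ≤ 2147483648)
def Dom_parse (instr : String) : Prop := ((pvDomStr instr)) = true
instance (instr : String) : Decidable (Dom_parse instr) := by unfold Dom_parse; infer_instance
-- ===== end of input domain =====

-- B changes the decomposition: instead of A's stateful is_rule flag loop, B splits the
-- line list at the first blank line up front and parses the two sections separately.
-- Both Pythons raise ValueError on a rule line that does not split into exactly two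
-- pieces on ": "; Pre_parse excludes exactly those inputs.

-- s.split(sep) for the non-empty literal separators used here (split? is none only for sep = "")
def splitS (s sep : String) : List String := (PySem.Str.split? s sep).getD []

-- ===== PORT A =====
def parseStepA (st : Bool × PySem.Dict String (List (List String)) × List String)
    (line : String) : Bool × PySem.Dict String (List (List String)) × List String :=
  let (is_rule, rules, inputs) := st
  if is_rule then
    if line == "" then (false, rules, inputs)
    else
      match splitS (PySem.Str.replace line "\"" "") ": " with
      | [name, rule] =>
          let rule_list := (splitS rule " | ").foldl
            (fun acc rp => acc ++ [splitS (PySem.Str.strip rp) " "]) []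
          (is_rule, rules.insert name rule_list, inputs)
      | _ => (is_rule, rules, inputs)   -- Python raises ValueError here; outside Pre_parse
  else (is_rule, rules, inputs ++ [line])

def parse (instr : String) : (List (String × List (List String))) × List String :=
  let r := (PySem.Str.splitlines instr).foldl parseStepA (true, PySem.Dict.empty, [])
  (r.2.1.items, r.2.2)

-- ===== PORT B =====
def ruleOfLineB (line : String) : Option (String × List (List String)) :=
  match splitS (PySem.Str.replace line "\"" "") ": " with
  | [name, rule] =>
      some (name, (splitS rule " | ").map (fun p => splitS (PySem.Str.strip p) " "))
  | _ => none   -- Python raises ValueError here; outside Pre_parse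

def ruleStepB (d : PySem.Dict String (List (List String))) (line : String) :
    PySem.Dict String (List (List String)) :=
  match ruleOfLineB line with
  | some (n, rl) => d.insert n rl
  | none => d

def parse_alt (instr : String) : (List (String × List (List String))) × List String :=
  let lines := PySem.Str.splitlines instr
  let (rule_lines, inputs) :=
    match PySem.List.index? lines "" with
    | none => (lines, ([] : List String))
    | some idx => (lines.take idx, lines.drop (idx + 1))
  let rules := rule_lines.foldl ruleStepB PySem.Dict.empty
  (rules.items, inputs)

-- ===== PRECONDITION & SPEC =====
-- Pre_parse excludes exactly the inputs on which Python A raises ValueError: a line in the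
-- rule section (before the first blank line) that does not split into exactly two pieces on ": ".
def Pre_parse (instr : String) : Prop :=
  ∀ line ∈ (PySem.Str.splitlines instr).takeWhile (fun l => l != ""),
    (splitS (PySem.Str.replace line "\"" "") ": ").length = 2
instance (instr : String) : Decidable (Pre_parse instr) := by unfold Pre_parse; infer_instance

def pvWitness_parse : String := "0: 1 2 | 3\n1: \"a\"\n\nab\nba"

def Spec_parse (instr : String) (out : (List (String × List (List String))) × List String) : Prop := out = parse_alt instr
instance (instr : String) (out : (List (String × List (List String))) × List String) : Decidable (Spec_parse instr out) := by unfold Spec_parse; infer_instance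

-- ===== CLAIM (what is proved, stated in full; the proofs are below) =====
def Claim_equal_parse : Prop := ∀ (instr : String), Dom_parse instr → Pre_parse instr → Spec_parse instr (parse instr)

-- ===== LEMMAS AND PROOFS =====

theorem flatten_map_singleton {α β : Type} (l : List α) (f : α → β) :
    (List.map (fun x => [f x]) l).flatten = List.map f l := by
  induction l with
  | nil => rfl
  | cons a t ih => simp [ih]

-- After the flag has flipped, A only appends the remaining lines to inputs.
theorem foldl_parseStepA_false (ls : List String)
    (d : PySem.Dict String (List (List String))) (ins : List String) :
    ls.foldl parseStepA (false, d, ins) = (false, d, ins ++ ls) := by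
  induction ls generalizing ins with
  | nil => simp
  | cons l t ih => simp [parseStepA, ih]

-- On a blank-free prefix, A's flag stays true and its dict accumulation is B's rule fold.
theorem foldl_parseStepA_true (ls : List String) (h : ∀ l ∈ ls, l ≠ "")
    (d : PySem.Dict String (List (List String))) (ins : List String) :
    ls.foldl parseStepA (true, d, ins) = (true, ls.foldl ruleStepB d, ins) := by
  induction ls generalizing d with
  | nil => simp
  | cons l t ih =>
      have hl : l ≠ "" := h l (by simp)
      have ht : ∀ x ∈ t, x ≠ "" := fun x hx => h x (by simp [hx])
      have hne : (l == "") = false := by simp [hl]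
      have hstep : parseStepA (true, d, ins) l = (true, ruleStepB d l, ins) := by
        simp only [parseStepA, ruleStepB, ruleOfLineB, hne, Bool.false_eq_true, if_false]
        cases hm : splitS (PySem.Str.replace l "\"" "") ": " with
        | nil => rfl
        | cons a t2 =>
            cases t2 with
            | nil => rfl
            | cons b t3 =>
                cases t3 with
                | nil => simp [flatten_map_singleton]
                | cons c t4 => rfl
      simp only [List.foldl_cons, hstep, ih ht]

-- ===== VERDICT (by name: the statement is the Claim_ definition above) =====
theorem parse_spec : Claim_equal_parse := by
  intro instr _ _
  unfold Spec_parse parse parse_alt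
  cases h : PySem.List.index? (PySem.Str.splitlines instr) "" with
  | none =>
      have hmem : ("" : String) ∉ PySem.Str.splitlines instr :=
        (PySem.List.index?_eq_none_iff _ _).mp h
      rw [foldl_parseStepA_true _ (fun l hl he => hmem (he ▸ hl))]
      simp only [h]
  | some idx =>
      obtain ⟨pre, suf, hsplit, hlen, hpre⟩ := (PySem.List.index?_eq_some_iff _ _ _).mp h
      have hpre' : ∀ l ∈ pre, l ≠ "" := fun l hl he => hpre (he ▸ hl)
      rw [hsplit] at h
      rw [hsplit, List.foldl_append, foldl_parseStepA_true pre hpre']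
      simp only [List.foldl_cons]
      rw [show parseStepA (true, pre.foldl ruleStepB PySem.Dict.empty, []) "" =
            (false, pre.foldl ruleStepB PySem.Dict.empty, []) from by simp [parseStepA],
          foldl_parseStepA_false]
      have htake : (pre ++ "" :: suf).take idx = pre := by
        rw [← hlen]; simp
      have hdrop : (pre ++ "" :: suf).drop (idx + 1) = suf := by
        rw [← hlen]; simp
      simp only [h, htake, hdrop]
      simp
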